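-- pv_equiv track=rewrite | github.com/adrmisty/hmm-pos-tagger | postprocessing_rules.py | promote_compound_nouns
-- ===== SOURCE A (Python) =====
-- from typing import List, Tuple
--
-- TaggedSentence = List[Tuple[str, str]]
--
-- def promote_compound_nouns(sentence: TaggedSentence) -> TaggedSentence:
--     """
--     Heuristic: Promotes a NOUN to PROPN if it is bordered by a PROPN.
--     This is a stricter rule than the original.
--     """
--     new_sentence = []
--
--     for i, (word, tag) in enumerate(sentence):
--         new_tag = tag
--
--         # Only check if the current tag is NOUN
--         if tag == 'NOUN':
--
--             # Check previous tag: must be PROPN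
--             prev_is_propn = sentence[i - 1][1] == 'PROPN' if i > 0 else False
--
--             # Check next tag: must be PROPN
--             next_is_propn = sentence[i + 1][1] == 'PROPN' if i < len(sentence) - 1 else False
--
--             # Stricter Rule: If the NOUN is bordered by at least one PROPN, promote it.
--             if prev_is_propn or next_is_propn:
--                 new_tag = 'PROPN'
--
--         new_sentence.append((word, new_tag))
--
--     return new_sentence
-- ===== SOURCE B (Python) =====
-- from typing import List, Tuple
--
-- TaggedSentence = List[Tuple[str, str]]
--
-- def promote_compound_nouns(sentence: TaggedSentence) -> TaggedSentence:
--     """PROPN-driven marking: collect neighbor indices of PROPN tokens, then rebuild."""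
--     promote = set()
--     n = len(sentence)
--     for i, (_, tag) in enumerate(sentence):
--         if tag == 'PROPN':
--             if i > 0:
--                 promote.add(i - 1)
--             if i + 1 < n:
--                 promote.add(i + 1)
--     out = []
--     for i, (word, tag) in enumerate(sentence):
--         if tag == 'NOUN' and i in promote:
--             out.append((word, 'PROPN'))
--         else:
--             out.append((word, tag))
--     return out
-- ===== Notes on version B (the rewrite author's own statement) =====
-- stated objective: alternative
-- what changed: Replaces per-NOUN guarded neighbor lookups with a two-pass PROPN-driven marking: pass one collects into a set the in-range neighbor indices of every PROPN token, pass two rebuilds the sentence promoting exactly the NOUN tokens whose index was marked.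
import Mathlib
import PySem

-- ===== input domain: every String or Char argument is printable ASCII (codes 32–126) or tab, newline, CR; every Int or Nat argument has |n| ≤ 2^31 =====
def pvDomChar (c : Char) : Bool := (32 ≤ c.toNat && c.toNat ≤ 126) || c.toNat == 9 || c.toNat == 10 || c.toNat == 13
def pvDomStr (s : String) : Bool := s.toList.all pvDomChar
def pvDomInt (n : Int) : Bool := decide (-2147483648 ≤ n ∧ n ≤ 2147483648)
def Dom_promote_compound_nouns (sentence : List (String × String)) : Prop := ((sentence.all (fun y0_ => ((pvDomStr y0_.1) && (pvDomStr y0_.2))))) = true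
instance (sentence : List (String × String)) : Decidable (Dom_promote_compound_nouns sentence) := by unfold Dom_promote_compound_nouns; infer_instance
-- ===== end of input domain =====

-- B replaces A's per-NOUN guarded neighbor lookups with two passes: mark PROPN neighbors in a set, then rebuild; alternative decomposition, same cost.

-- ===== PORT A =====
-- literal transliteration of A: enumerate + append, guarded absolute indexing
def promote_compound_nouns (sentence : List (String × String)) : List (String × String) :=
  (PySem.List.enumerate sentence).foldl (fun new_sentence p =>
    let i : Int := p.1
    let word := p.2.1
    let tag := p.2.2
    let new_tag :=
      if tag = "NOUN" then
        let prev_is_propn : Bool :=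
          if 0 < i then ((PySem.List.pyGet? sentence (i - 1)).map Prod.snd == some "PROPN") else false
        let next_is_propn : Bool :=
          if i < (sentence.length : Int) - 1 then ((PySem.List.pyGet? sentence (i + 1)).map Prod.snd == some "PROPN") else false
        if prev_is_propn || next_is_propn then "PROPN" else tag
      else tag
    new_sentence ++ [(word, new_tag)]) []

-- ===== PORT B =====
-- B pass one: the set of in-range neighbor indices of PROPN tokens
def promoteIdxSet (sentence : List (String × String)) : PySem.Set Int :=
  (PySem.List.enumerate sentence).foldl (fun promote p =>
    if p.2.2 = "PROPN" then
      let promote := if 0 < p.1 then PySem.Set.add promote (p.1 - 1) else promote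
      if p.1 + 1 < (sentence.length : Int) then PySem.Set.add promote (p.1 + 1) else promote
    else promote) PySem.Set.empty

-- literal transliteration of B: rebuild, promoting NOUNs whose index is marked
def promote_compound_nouns_alt (sentence : List (String × String)) : List (String × String) :=
  let promote := promoteIdxSet sentence
  (PySem.List.enumerate sentence).foldl (fun out p =>
    if p.2.2 = "NOUN" ∧ PySem.Set.contains promote p.1 then out ++ [(p.2.1, "PROPN")]
    else out ++ [(p.2.1, p.2.2)]) []

-- ===== PRECONDITION & SPEC =====
def Spec_promote_compound_nouns (sentence : List (String × String)) (out : List (String × String)) : Prop := out = promote_compound_nouns_alt sentence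
instance (sentence : List (String × String)) (out : List (String × String)) : Decidable (Spec_promote_compound_nouns sentence out) := by unfold Spec_promote_compound_nouns; infer_instance

-- ===== CLAIM (what is proved, stated in full; the proofs are below) =====
def Claim_equal_promote_compound_nouns : Prop := ∀ (sentence : List (String × String)), Dom_promote_compound_nouns sentence → Spec_promote_compound_nouns sentence (promote_compound_nouns sentence)

-- ===== LEMMAS AND PROOFS =====

-- one step of B's first-pass fold
theorem mem_promote_step (s : List (String × String)) (acc : PySem.Set Int)
    (q : Int × (String × String)) (x : Int) :
    x ∈ (if q.2.2 = "PROPN" then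
        let acc' := if 0 < q.1 then PySem.Set.add acc (q.1 - 1) else acc
        if q.1 + 1 < (s.length : Int) then PySem.Set.add acc' (q.1 + 1) else acc'
      else acc) ↔
    x ∈ acc ∨ (q.2.2 = "PROPN" ∧
      ((0 < q.1 ∧ x = q.1 - 1) ∨ (q.1 + 1 < (s.length : Int) ∧ x = q.1 + 1))) := by
  split_ifs with h1 h2 h3 h4 <;>
    first
      | (simp only [PySem.Set.mem_add]; tauto)
      | tauto

-- membership accumulated by B's first-pass fold
theorem mem_promote_fold (s : List (String × String)) (l : List (Int × (String × String)))
    (acc : PySem.Set Int) (x : Int) :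
    x ∈ l.foldl (fun promote p =>
      if p.2.2 = "PROPN" then
        let promote := if 0 < p.1 then PySem.Set.add promote (p.1 - 1) else promote
        if p.1 + 1 < (s.length : Int) then PySem.Set.add promote (p.1 + 1) else promote
      else promote) acc ↔
    x ∈ acc ∨ ∃ p ∈ l, p.2.2 = "PROPN" ∧
      ((0 < p.1 ∧ x = p.1 - 1) ∨ (p.1 + 1 < (s.length : Int) ∧ x = p.1 + 1)) := by
  induction l generalizing acc with
  | nil => simp
  | cons q t ih =>
    simp only [List.foldl_cons, ih, mem_promote_step, List.mem_cons]
    constructor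
    · rintro ((h | h) | ⟨p, hp, hc⟩)
      · exact Or.inl h
      · exact Or.inr ⟨q, Or.inl rfl, h⟩
      · exact Or.inr ⟨p, Or.inr hp, hc⟩
    · rintro (h | ⟨p, rfl | hp, hc⟩)
      · exact Or.inl (Or.inl h)
      · exact Or.inl (Or.inr hc)
      · exact Or.inr ⟨p, hp, hc⟩

theorem mem_promoteIdxSet (s : List (String × String)) (k : Nat) (hk : k < s.length) :
    ((k : Int) ∈ promoteIdxSet s) ↔
      ((0 < k ∧ (s[k-1]'(by omega)).2 = "PROPN") ∨
       (k + 1 < s.length ∧ s[k+1]?.map Prod.snd = some "PROPN")) := by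
  unfold promoteIdxSet
  rw [mem_promote_fold]
  simp only [PySem.Set.empty, List.not_mem_nil, false_or,
    PySem.List.mem_enumerate_iff]
  constructor
  · rintro ⟨p, ⟨j, hj, rfl⟩, hprop, hcase⟩
    simp only [zero_add] at hprop hcase
    rcases hcase with ⟨hj0, hx⟩ | ⟨hjn, hx⟩
    · right
      have hj' : j = k + 1 := by omega
      subst hj'
      refine ⟨by omega, ?_⟩
      rw [List.getElem?_eq_getElem hj]
      simpa using hprop
    · left
      have hj1 : j = k - 1 := by omega
      have hk0 : 0 < k := by omega
      refine ⟨hk0, ?_⟩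
      subst hj1; exact hprop
  · rintro (⟨hk0, hp⟩ | ⟨hk1, hp⟩)
    · exact ⟨((k - 1 : Nat), s[k-1]'(by omega)), ⟨k - 1, by omega, by simp⟩, hp,
        Or.inr ⟨by omega, by omega⟩⟩
    · rw [List.getElem?_eq_getElem hk1] at hp
      exact ⟨((k + 1 : Nat), s[k+1]'(by omega)), ⟨k + 1, by omega, by simp⟩, by simpa using hp,
        Or.inl ⟨by omega, by omega⟩⟩

theorem promote_equal (sentence : List (String × String)) :
    promote_compound_nouns sentence = promote_compound_nouns_alt sentence := by
  simp only [promote_compound_nouns, promote_compound_nouns_alt]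
  have hbody : (fun (out : List (String × String)) (p : Int × (String × String)) =>
      if p.2.2 = "NOUN" ∧ PySem.Set.contains (promoteIdxSet sentence) p.1 then out ++ [(p.2.1, "PROPN")]
      else out ++ [(p.2.1, p.2.2)]) =
      (fun out p => out ++ [if p.2.2 = "NOUN" ∧ PySem.Set.contains (promoteIdxSet sentence) p.1
        then (p.2.1, "PROPN") else (p.2.1, p.2.2)]) := by
    funext out p; split_ifs <;> rfl
  rw [hbody, PySem.List.foldl_append_singleton_eq_map, PySem.List.foldl_append_singleton_eq_map]
  · simp only [List.nil_append]
    apply List.map_congr_left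
    intro p hp
    rw [PySem.List.mem_enumerate_iff] at hp
    obtain ⟨k, hk, rfl⟩ := hp
    simp only [zero_add]
    by_cases ht : sentence[k].2 = "NOUN"
    case neg => simp [ht]
    have hmem := mem_promoteIdxSet sentence k hk
    have hAcond : ((if 0 < (k:Int) then ((PySem.List.pyGet? sentence ((k:Int) - 1)).map Prod.snd == some "PROPN") else false) ||
        (if (k:Int) < (sentence.length : Int) - 1 then ((PySem.List.pyGet? sentence ((k:Int) + 1)).map Prod.snd == some "PROPN") else false)) = true ↔
        ((k : Int) ∈ promoteIdxSet sentence) := by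
      rw [hmem, Bool.or_eq_true]
      constructor
      · rintro (h | h)
        · split_ifs at h with h0
          left
          have hk0 : 0 < k := by exact_mod_cast h0
          refine ⟨hk0, ?_⟩
          rw [show ((k : Int) - 1) = ((k - 1 : Nat) : Int) by omega,
            PySem.List.pyGet?_natCast, List.getElem?_eq_getElem (by omega)] at h
          simpa using h
        · split_ifs at h with h1
          right
          have hk1 : k + 1 < sentence.length := by omega
          refine ⟨hk1, ?_⟩
          rw [show ((k : Int) + 1) = ((k + 1 : Nat) : Int) by push_cast; ring,
            PySem.List.pyGet?_natCast] at h
          rw [List.getElem?_eq_getElem hk1] at h ⊢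
          simpa using h
      · rintro (⟨hk0, hp⟩ | ⟨hk1, hp⟩)
        · left
          rw [if_pos (show (0:Int) < (k:Int) by exact_mod_cast hk0),
            show ((k : Int) - 1) = ((k - 1 : Nat) : Int) by omega,
            PySem.List.pyGet?_natCast, List.getElem?_eq_getElem (by omega)]
          simp [hp]
        · right
          rw [if_pos (show (k:Int) < (sentence.length : Int) - 1 by omega),
            show ((k : Int) + 1) = ((k + 1 : Nat) : Int) by push_cast; ring,
            PySem.List.pyGet?_natCast, List.getElem?_eq_getElem hk1]
          rw [List.getElem?_eq_getElem hk1] at hp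
          simpa using hp
    by_cases hmemb : (k : Int) ∈ promoteIdxSet sentence
    · have hA := hAcond.mpr hmemb
      have hc : PySem.Set.contains (promoteIdxSet sentence) (k : Int) = true := by
        simpa using hmemb
      rw [if_pos ht, if_pos hA, if_pos ⟨ht, hc⟩]
    · have hA : ¬ (((if 0 < (k:Int) then ((PySem.List.pyGet? sentence ((k:Int) - 1)).map Prod.snd == some "PROPN") else false) ||
          (if (k:Int) < (sentence.length : Int) - 1 then ((PySem.List.pyGet? sentence ((k:Int) + 1)).map Prod.snd == some "PROPN") else false)) = true) :=
        fun h => hmemb (hAcond.mp h)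
      have hc : ¬ PySem.Set.contains (promoteIdxSet sentence) (k : Int) = true := by
        simpa using hmemb
      rw [if_pos ht, if_neg hA, if_neg (fun hcc => hc hcc.2)]

-- ===== VERDICT (by name: the statement is the Claim_ definition above) =====
theorem promote_compound_nouns_spec : Claim_equal_promote_compound_nouns := by
  intro s _
  exact promote_equal s
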